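-- pv_equiv track=rewrite | github.com/Sassa-nf/pi | longest_dup/e.py | doh1
-- ===== SOURCE A (Python) =====
-- def doh1(xs):
--    r = 0
--    n = len(xs)
--    should = n >> 1
--    m = 0
--    while should:
--       actual = 0
--       for x in xs:
--          actual += (x >> m) & 1
--       if should < actual:
--          r += 1 << m
--       m += 1
--       should = n >> m
--       should = ((should >> 1) << m) + (n & ((1 << m) - 1) if should & 1 else 0)
--    return r
-- ===== SOURCE B (Python) =====
-- def doh1(xs):
--     # Pair each element with its own index: accumulate the signed per-bit deficit
--     # bit_m(x) - bit_m(i) in one pass; bit m of the result is set iff the deficit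
--     # over the whole list is positive. No threshold formula is ever computed: the
--     # index bits themselves supply the expected counts (index-pairing, XOR-trick style).
--     n = len(xs)
--     nb = (n - 1).bit_length()
--     delta = [0] * nb
--     for i, x in enumerate(xs):
--         for m in range(nb):
--             delta[m] += ((x >> m) & 1) - ((i >> m) & 1)
--     return sum(1 << m for m in range(nb) if delta[m] > 0)
-- ===== Notes on version B (the rewrite author's own statement) =====
-- stated objective: alternative
-- what changed: B never computes A's closed-form per-bit threshold: it pairs each element with its own index (XOR-trick style) and accumulates a signed per-bit deficit bit_m(x)-bit_m(i) in one pass over enumerate(xs), then sets bit m of the result iff that deficit is positive, for m < (n-1).bit_length().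
import Mathlib
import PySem

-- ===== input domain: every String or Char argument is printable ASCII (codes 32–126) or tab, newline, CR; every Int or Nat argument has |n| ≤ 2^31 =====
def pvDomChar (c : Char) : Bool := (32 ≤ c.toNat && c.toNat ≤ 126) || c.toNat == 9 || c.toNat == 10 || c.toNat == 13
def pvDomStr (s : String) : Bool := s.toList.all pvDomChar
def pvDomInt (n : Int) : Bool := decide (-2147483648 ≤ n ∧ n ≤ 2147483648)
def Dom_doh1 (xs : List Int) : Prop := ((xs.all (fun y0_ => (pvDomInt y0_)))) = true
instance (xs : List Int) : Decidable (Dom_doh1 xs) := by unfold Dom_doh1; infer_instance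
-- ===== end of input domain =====

-- B drops A's closed-form per-bit threshold entirely: it pairs each element with its own index
-- and accumulates a signed per-bit deficit bit_m(x) - bit_m(i) in one pass over enumerate(xs);
-- bit m of the result is set iff the deficit is positive (objective: alternative algorithm).

-- ===== PORT A =====
-- The while loop runs for m = 0,1,2,… and `should` is 0 as soon as n >> m = 0, so it executes
-- at most bitLength n iterations; the fuel `bitLength n` makes the port total without changing it.
def doh1Loop (xs : List Int) (n : Int) : Nat → Int → Nat → Int → Int
  | 0, r, _, _ => r
  | fuel + 1, r, m, should =>
    if should = 0 then r
    else
      let actual := xs.foldl (fun (a x : Int) => a + PySem.Int.band (x >>> m) 1) 0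
      let r' := if should < actual then r + ((1 : Int) <<< m) else r
      let m' := m + 1
      let s1 := n >>> m'
      let should' := ((s1 >>> (1:Nat)) <<< m') +
        (if PySem.Int.band s1 1 ≠ 0 then PySem.Int.band n (((1 : Int) <<< m') - 1) else 0)
      doh1Loop xs n fuel r' m' should'

def doh1 (xs : List Int) : Int :=
  let n : Int := xs.length
  doh1Loop xs n (PySem.Int.bitLength n) 0 0 (n >>> (1:Nat))

-- ===== PORT B =====
-- `for m in range(nb): delta[m] += ((x >> m) & 1) - ((i >> m) & 1)`; m ranges over the Nats
-- below nb, so the Nat-indexed List.range nb is exact (the shift amount is the same nonneg m).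
def deltaUpd (i x : Int) (d : List Int) (m : Nat) : List Int :=
  PySem.List.pySetD d (m : Int)
    (PySem.List.pyGetD d (m : Int) 0 +
      (PySem.Int.band (x >>> m) 1 - PySem.Int.band (i >>> m) 1))

def deltaStep (nb : Nat) (d : List Int) (p : Int × Int) : List Int :=
  (List.range nb).foldl (deltaUpd p.1 p.2) d

-- `sum(1 << m for m in range(nb) if delta[m] > 0)` as a fold over the same range.
def doh1_alt (xs : List Int) : Int :=
  let n : Int := xs.length
  let nb := PySem.Int.bitLength (n - 1)
  let delta := (PySem.List.enumerate xs 0).foldl (deltaStep nb) (List.replicate nb 0)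
  (List.range nb).foldl
    (fun (a : Int) (m : Nat) =>
      if 0 < PySem.List.pyGetD delta (m : Int) 0 then a + ((1 : Int) <<< m) else a) 0

-- ===== PRECONDITION & SPEC =====
def Spec_doh1 (xs : List Int) (out : Int) : Prop := out = doh1_alt xs
instance (xs : List Int) (out : Int) : Decidable (Spec_doh1 xs out) := by unfold Spec_doh1; infer_instance

-- ===== CLAIM (what is proved, stated in full; the proofs are below) =====
def Claim_equal_doh1 : Prop := ∀ (xs : List Int), Dom_doh1 xs → Spec_doh1 xs (doh1 xs)

-- ===== LEMMAS AND PROOFS =====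

-- the value A's carried variable `should` holds at the top of the iteration for bit m
def shouldVal (n : Int) (m : Nat) : Int :=
  ((n >>> m >>> (1:Nat)) <<< m) +
    (if PySem.Int.band (n >>> m) 1 ≠ 0 then PySem.Int.band n (((1 : Int) <<< m) - 1) else 0)

-- Nat-level closed form of `should` for bit m, and the per-bit popcount of range n
def gNat (n m : Nat) : Nat :=
  (n / 2 ^ (m + 1)) * 2 ^ m + (if (n / 2 ^ m) % 2 = 1 then n % 2 ^ m else 0)

def sumIdx (n m : Nat) : Nat := ((List.range n).map (fun i => (i / 2 ^ m) % 2)).sum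

-- A's inner per-bit scan
def actualB (xs : List Int) (m : Nat) : Int :=
  xs.foldl (fun (a x : Int) => a + PySem.Int.band (x >>> m) 1) 0

-- the bits both programs set, summed over j ∈ [m, m+k)
def tailSum (xs : List Int) (n : Nat) (m k : Nat) : Int :=
  ((List.range' m k).map
    (fun j => if ((gNat n j : Int)) < actualB xs j then (1 : Int) <<< j else 0)).sum

theorem shouldVal_zero (n : Int) : shouldVal n 0 = n >>> (1:Nat) := by
  simp [shouldVal, PySem.Int.band_zero]

theorem shouldVal_natCast (n m : Nat) : shouldVal (n : Int) m = (gNat n m : Int) := by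
  have hsr : ∀ (a k : Nat), ((a : Int) >>> k) = ((a >>> k : Nat) : Int) := by
    intro a k; exact_mod_cast rfl
  have hsl : ∀ (a k : Nat), ((a : Int) <<< k) = ((a <<< k : Nat) : Int) := by
    intro a k; exact_mod_cast rfl
  have h1 : (1 : Int) = ((1 : Nat) : Int) := rfl
  unfold shouldVal gNat
  rw [hsr n m, hsr (n >>> m) 1, hsl]
  rw [show ((1:Int) <<< m) - 1 = ((2 ^ m - 1 : Nat) : Int) by
    rw [h1, hsl]
    have : (1 : Nat) <<< m = 2 ^ m := Nat.one_shiftLeft m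
    rw [this]
    have : (1:Nat) ≤ 2 ^ m := Nat.one_le_two_pow
    push_cast [this]; ring]
  rw [h1, PySem.Int.band_natCast, PySem.Int.band_natCast]
  have e1 : (n >>> m) >>> 1 = n / 2 ^ (m + 1) := by
    simp [Nat.shiftRight_eq_div_pow, Nat.div_div_eq_div_mul, pow_succ]
  have e2 : (n >>> m) &&& 1 = (n / 2 ^ m) % 2 := by
    rw [Nat.and_one_is_mod, Nat.shiftRight_eq_div_pow]
  have e3 : n &&& (2 ^ m - 1) = n % 2 ^ m := Nat.and_two_pow_sub_one_eq_mod n m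
  rw [e1, e2, e3, Nat.shiftLeft_eq]
  rcases Nat.mod_two_eq_zero_or_one (n / 2 ^ m) with h | h <;> simp [h]

theorem gNat_succ (n m : Nat) : gNat (n + 1) m = gNat n m + (n / 2 ^ m) % 2 := by
  obtain ⟨a, b, hb, rfl⟩ : ∃ a b, b < 2 ^ m ∧ n = 2 ^ m * a + b :=
    ⟨n / 2 ^ m, n % 2 ^ m, Nat.mod_lt _ (Nat.two_pow_pos m),
      by rw [Nat.div_add_mod]⟩
  have hM : 0 < 2 ^ m := Nat.two_pow_pos m
  have hdiv : (2 ^ m * a + b) / 2 ^ m = a := by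
    rw [Nat.mul_add_div hM, Nat.div_eq_of_lt hb, Nat.add_zero]
  have hmod : (2 ^ m * a + b) % 2 ^ m = b := by
    rw [Nat.mul_add_mod, Nat.mod_eq_of_lt hb]
  have hdd : ∀ t : Nat, t / 2 ^ (m + 1) = t / 2 ^ m / 2 := by
    intro t; rw [pow_succ, Nat.div_div_eq_div_mul]
  by_cases hb1 : b + 1 < 2 ^ m
  · have hdiv' : (2 ^ m * a + (b + 1)) / 2 ^ m = a := by
      rw [Nat.mul_add_div hM, Nat.div_eq_of_lt hb1, Nat.add_zero]
    have hmod' : (2 ^ m * a + (b + 1)) % 2 ^ m = b + 1 := by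
      rw [Nat.mul_add_mod, Nat.mod_eq_of_lt hb1]
    unfold gNat
    rw [show 2 ^ m * a + b + 1 = 2 ^ m * a + (b + 1) from by ring]
    rw [hdd, hdd, hdiv, hdiv', hmod, hmod']
    rcases Nat.mod_two_eq_zero_or_one a with h | h <;> simp [h] <;> omega
  · have hbeq : b + 1 = 2 ^ m := by omega
    have hn1 : 2 ^ m * a + b + 1 = 2 ^ m * (a + 1) := by rw [Nat.mul_add, Nat.mul_one]; omega
    have hdiv' : (2 ^ m * (a + 1)) / 2 ^ m = a + 1 := by
      rw [Nat.mul_div_cancel_left _ hM]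
    have hmod' : (2 ^ m * (a + 1)) % 2 ^ m = 0 := by
      simp [Nat.mul_mod_right]
    unfold gNat
    rw [hn1, hdd, hdd, hdiv, hdiv', hmod, hmod']
    rcases Nat.even_or_odd a with ⟨c, hc⟩ | ⟨c, hc⟩
    · subst hc
      have h2 : (c + c) % 2 = 0 := by omega
      have h3 : (c + c) / 2 = c := by omega
      have h4 : (c + c + 1) / 2 = c := by omega
      simp [h2, h3, h4]
    · subst hc
      have h2 : (2 * c + 1) % 2 = 1 := by omega
      have h3 : (2 * c + 1) / 2 = c := by omega
      have h4 : (2 * c + 1 + 1) / 2 = c + 1 := by omega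
      have h6 : (2 * c + 1 + 1) % 2 = 0 := by omega
      simp [h2, h3, h4, h6]
      have h5 : (c + 1) * 2 ^ m = c * 2 ^ m + 2 ^ m := by ring
      omega

theorem gNat_eq_sumIdx (n m : Nat) : gNat n m = sumIdx n m := by
  induction n with
  | zero => simp [gNat, sumIdx]
  | succ n ih =>
    rw [gNat_succ, ih]
    unfold sumIdx
    rw [List.range_succ, List.map_append, List.sum_append]
    simp

theorem gNat_eq_zero_iff (n m : Nat) : gNat n m = 0 ↔ n ≤ 2 ^ m := by
  have hM : 0 < 2 ^ m := Nat.two_pow_pos m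
  unfold gNat
  constructor
  · intro h
    by_contra hlt
    push_neg at hlt
    by_cases h2 : n < 2 ^ (m + 1)
    · have hd : n / 2 ^ m = 1 := by
        have : 2 ^ (m + 1) = 2 ^ m * 2 := by rw [pow_succ]
        rw [Nat.div_eq_sub_div hM (by omega)]
        rw [Nat.div_eq_of_lt (by omega)]
      have hmod : 0 < n % 2 ^ m := by
        have := Nat.div_add_mod n (2 ^ m)
        rw [hd] at this
        have h2' : 2 ^ (m + 1) = 2 ^ m * 2 := by rw [pow_succ]
        omega
      rw [hd] at h
      simp at h
      omega
    · push_neg at h2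
      have : 1 ≤ n / 2 ^ (m + 1) := (Nat.one_le_div_iff (by positivity)).2 h2
      have : 2 ^ m ≤ (n / 2 ^ (m + 1)) * 2 ^ m := Nat.le_mul_of_pos_left _ (by omega)
      omega
  · intro h
    rcases Nat.lt_or_ge n (2 ^ m) with hlt | hge
    · have h1 : n / 2 ^ (m + 1) = 0 := Nat.div_eq_of_lt (by
        have : 2 ^ m ≤ 2 ^ (m + 1) := Nat.pow_le_pow_right (by norm_num) (by omega)
        omega)
      have h2 : n / 2 ^ m = 0 := Nat.div_eq_of_lt hlt
      simp [h1, h2]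
    · have hn : n = 2 ^ m := by omega
      subst hn
      have h1 : 2 ^ m / 2 ^ (m + 1) = 0 := Nat.div_eq_of_lt
        (Nat.pow_lt_pow_right (by norm_num) (by omega))
      simp [h1]

theorem bitLen_iff (k m : Nat) : m < PySem.Int.bitLength (k : Int) ↔ 2 ^ m ≤ k := by
  constructor
  · intro h
    rcases Nat.eq_zero_or_pos k with rfl | hk
    · simp [PySem.Int.bitLength_zero] at h
    · have hne : (k : Int) ≠ 0 := by exact_mod_cast hk.ne'
      have h1 := PySem.Int.two_pow_bitLength_le (k : Int) hne
      have h2 : (k : Int).natAbs = k := Int.natAbs_natCast k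
      rw [h2] at h1
      calc 2 ^ m ≤ 2 ^ (PySem.Int.bitLength (k : Int) - 1) :=
            Nat.pow_le_pow_right (by norm_num) (by omega)
        _ ≤ k := h1
  · intro h
    have h1 := PySem.Int.lt_two_pow_bitLength (k : Int)
    rw [Int.natAbs_natCast] at h1
    have : 2 ^ m < 2 ^ (PySem.Int.bitLength (k : Int)) := by omega
    exact (Nat.pow_lt_pow_iff_right (by norm_num)).1 this


theorem tailSum_succ (xs : List Int) (n m k : Nat) :
    tailSum xs n m (k + 1)
    = (if ((gNat n m : Int)) < actualB xs m then (1 : Int) <<< m else 0) + tailSum xs n (m + 1) k := by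
  simp [tailSum, List.range'_succ]

-- ---- A's loop computes tailSum ----
theorem loopA (xs : List Int) (n : Nat) (nb : Nat)
    (hnb : ∀ m, m < nb ↔ 2 ^ m < n) :
    ∀ fuel m r, nb ≤ m + fuel →
      doh1Loop xs (n : Int) fuel r m (shouldVal (n : Int) m) = r + tailSum xs n m (nb - m) := by
  intro fuel
  induction fuel with
  | zero =>
    intro m r h
    have hk : nb - m = 0 := by omega
    simp [doh1Loop, tailSum, hk]
  | succ fuel ih =>
    intro m r h
    have hgz := gNat_eq_zero_iff n m
    have hm' := hnb m
    rw [doh1Loop]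
    by_cases hm : m < nb
    · have h0 : ¬ shouldVal (n : Int) m = 0 := by
        rw [shouldVal_natCast]
        exact_mod_cast (by omega : ¬ gNat n m = 0)
      rw [if_neg h0]
      show doh1Loop xs (n : Int) fuel
          (if shouldVal (n : Int) m < actualB xs m then r + ((1 : Int) <<< m) else r)
          (m + 1) (shouldVal (n : Int) (m + 1)) = r + tailSum xs n m (nb - m)
      rw [ih (m + 1) _ (by omega)]
      have hk : nb - m = (nb - (m + 1)) + 1 := by omega
      rw [hk, tailSum_succ, shouldVal_natCast]
      split_ifs <;> ring
    · have h0 : shouldVal (n : Int) m = 0 := by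
        rw [shouldVal_natCast]
        exact_mod_cast (by omega : gNat n m = 0)
      rw [if_pos h0]
      have hk : nb - m = 0 := by omega
      simp [tailSum, hk]

-- ---- B's delta table ----
theorem getD_set_int (c : List Int) (m j : Nat) (v : Int) (hm : m < c.length) :
    (c.set m v).getD j 0 = if m = j then v else c.getD j 0 := by
  simp only [List.getD, List.getElem?_set, hm]
  split_ifs <;> simp_all

theorem deltaUpd_length (i x : Int) (c : List Int) (m : Nat) :
    (deltaUpd i x c m).length = c.length := by
  simp [deltaUpd]

theorem deltaStep_inner_length (i x : Int) (k : Nat) (c : List Int) :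
    ((List.range k).foldl (deltaUpd i x) c).length = c.length := by
  induction k generalizing c with
  | zero => simp
  | succ k ih =>
    rw [List.range_succ, List.foldl_append]
    simp [deltaUpd_length, ih]

theorem deltaStep_length (nb : Nat) (c : List Int) (p : Int × Int) :
    (deltaStep nb c p).length = c.length := deltaStep_inner_length p.1 p.2 nb c

theorem deltaStep_inner_getD (i x : Int) (k : Nat) (c : List Int) (j : Nat)
    (hk : k ≤ c.length) :
    ((List.range k).foldl (deltaUpd i x) c).getD j 0
    = c.getD j 0 + (if j < k then PySem.Int.band (x >>> j) 1 - PySem.Int.band (i >>> j) 1 else 0) := by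
  induction k generalizing j with
  | zero => simp
  | succ k ih =>
    rw [List.range_succ, List.foldl_append]
    simp only [List.foldl_cons, List.foldl_nil, deltaUpd, PySem.List.pySetD_natCast,
      PySem.List.pyGetD_natCast]
    have hlen := deltaStep_inner_length i x k c
    have hm : k < ((List.range k).foldl (deltaUpd i x) c).length := by omega
    rw [getD_set_int _ _ _ _ hm, ih k (by omega)]
    by_cases hj : k = j
    · subst hj
      simp [(by omega : k < k + 1)]
    · rw [if_neg hj, ih j (by omega)]
      by_cases h1 : j < k
      · rw [if_pos h1, if_pos (by omega : j < k + 1)]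
      · rw [if_neg h1, if_neg (by omega : ¬ j < k + 1)]

theorem deltaStep_getD (nb : Nat) (c : List Int) (p : Int × Int) (j : Nat)
    (hnb : nb ≤ c.length) (hj : j < nb) :
    (deltaStep nb c p).getD j 0
    = c.getD j 0 + (PySem.Int.band (p.2 >>> j) 1 - PySem.Int.band (p.1 >>> j) 1) := by
  rw [deltaStep, deltaStep_inner_getD p.1 p.2 nb c j hnb, if_pos hj]

theorem table_getD (nb : Nat) (ps : List (Int × Int)) (c : List Int) (j : Nat)
    (hnb : nb ≤ c.length) (hj : j < nb) :
    (ps.foldl (deltaStep nb) c).getD j 0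
    = c.getD j 0
      + (ps.map (fun p : Int × Int => PySem.Int.band (p.2 >>> j) 1 - PySem.Int.band (p.1 >>> j) 1)).sum := by
  induction ps generalizing c with
  | nil => simp
  | cons p ps ih =>
    simp only [List.foldl_cons, List.map_cons, List.sum_cons]
    rw [ih (deltaStep nb c p) (by rw [deltaStep_length]; exact hnb),
      deltaStep_getD nb c p j hnb hj]
    ring

theorem sum_map_sub {alpha : Type} (l : List alpha) (f g : alpha → Int) :
    (l.map (fun p => f p - g p)).sum = (l.map f).sum - (l.map g).sum := by
  induction l with
  | nil => simp
  | cons a l ih => simp only [List.map_cons, List.sum_cons, ih]; ring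

theorem sum_idx_cast (n j : Nat) :
    ((List.range n).map (fun i : Nat => PySem.Int.band ((i : Int) >>> j) 1)).sum
    = (sumIdx n j : Int) := by
  induction n with
  | zero => simp [sumIdx]
  | succ n ih =>
    rw [List.range_succ, List.map_append, List.sum_append, ih]
    have hc : PySem.Int.band ((n : Int) >>> j) 1 = (((n / 2 ^ j) % 2 : Nat) : Int) := by
      rw [show ((n : Int) >>> j) = ((n >>> j : Nat) : Int) from by exact_mod_cast rfl,
        show (1 : Int) = ((1 : Nat) : Int) from rfl, PySem.Int.band_natCast,
        Nat.and_one_is_mod, Nat.shiftRight_eq_div_pow]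
    rw [show sumIdx (n + 1) j = sumIdx n j + (n / 2 ^ j) % 2 from by
      unfold sumIdx
      rw [List.range_succ, List.map_append, List.sum_append]
      simp]
    rw [Nat.cast_add]
    simp [hc]

theorem delta_getD (xs : List Int) (nb j : Nat) (hj : j < nb) :
    ((PySem.List.enumerate xs 0).foldl (deltaStep nb) (List.replicate nb 0)).getD j 0
    = actualB xs j - (sumIdx xs.length j : Int) := by
  rw [table_getD nb _ _ j (by simp) hj]
  rw [show (fun p : Int × Int =>
        PySem.Int.band (p.2 >>> j) 1 - PySem.Int.band (p.1 >>> j) 1)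
      = (fun p : Int × Int =>
        (fun q : Int × Int => PySem.Int.band (q.2 >>> j) 1) p
          - (fun q : Int × Int => PySem.Int.band (q.1 >>> j) 1) p) from rfl,
    sum_map_sub]
  have h2 : ((PySem.List.enumerate xs 0).map (fun q : Int × Int => PySem.Int.band (q.2 >>> j) 1)).sum
      = actualB xs j := by
    rw [show (fun q : Int × Int => PySem.Int.band (q.2 >>> j) 1)
        = (fun x : Int => PySem.Int.band (x >>> j) 1) ∘ Prod.snd from rfl,
      ← List.map_map, PySem.List.map_snd_enumerate, actualB, PySem.List.foldl_add]
    simp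
  have h1 : ((PySem.List.enumerate xs 0).map (fun q : Int × Int => PySem.Int.band (q.1 >>> j) 1)).sum
      = (sumIdx xs.length j : Int) := by
    rw [show (fun q : Int × Int => PySem.Int.band (q.1 >>> j) 1)
        = (fun i : Int => PySem.Int.band (i >>> j) 1) ∘ Prod.fst from rfl,
      ← List.map_map, PySem.List.map_fst_enumerate]
    rw [show (0 : Int) + (xs.length : Int) = (xs.length : Int) from by ring]
    rw [PySem.List.pyRange_zero_natCast, List.map_map]
    exact sum_idx_cast xs.length j
  rw [h1, h2]
  simp

theorem foldl_ite_sum (l : List Nat) (c : Nat → Prop) [DecidablePred c]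
    (f : Nat → Int) (init : Int) :
    l.foldl (fun a m => if c m then a + f m else a) init
    = init + (l.map (fun m => if c m then f m else 0)).sum := by
  induction l generalizing init with
  | nil => simp
  | cons a l ih =>
    by_cases h : c a <;>
      simp only [List.foldl_cons, List.map_cons, List.sum_cons, h, if_true, if_false, ih] <;>
      ring

theorem main_ne (xs : List Int) (hN : 1 ≤ xs.length) : doh1 xs = doh1_alt xs := by
  set nb : Nat := PySem.Int.bitLength ((xs.length : Int) - 1) with hnbdef
  have hcast : ((xs.length : Int) - 1) = ((xs.length - 1 : Nat) : Int) := by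
    rw [Nat.cast_sub hN]; norm_num
  have hnb : ∀ m, m < nb ↔ 2 ^ m < xs.length := by
    intro m
    rw [hnbdef, hcast, bitLen_iff]
    omega
  have hfuel : nb ≤ PySem.Int.bitLength (xs.length : Int) := by
    have h1 := PySem.Int.lt_two_pow_bitLength (xs.length : Int)
    rw [Int.natAbs_natCast] at h1
    by_contra hcon
    push_neg at hcon
    have := (hnb (PySem.Int.bitLength (xs.length : Int))).1 hcon
    omega
  have hA : doh1 xs = 0 + tailSum xs xs.length 0 (nb - 0) := by
    rw [show doh1 xs
        = doh1Loop xs (xs.length : Int) (PySem.Int.bitLength (xs.length : Int)) 0 0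
            ((xs.length : Int) >>> (1:Nat)) from rfl]
    rw [← shouldVal_zero]
    exact loopA xs xs.length nb hnb _ 0 0 (by omega)
  have hB : doh1_alt xs
      = 0 + ((List.range nb).map
          (fun (m : Nat) =>
            if 0 < PySem.List.pyGetD
                ((PySem.List.enumerate xs 0).foldl (deltaStep nb) (List.replicate nb 0))
                (m : Int) 0
            then (1 : Int) <<< m else 0)).sum := by
    rw [show doh1_alt xs
        = (List.range nb).foldl
            (fun (a : Int) (m : Nat) =>
              if 0 < PySem.List.pyGetD
                  ((PySem.List.enumerate xs 0).foldl (deltaStep nb) (List.replicate nb 0))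
                  (m : Int) 0
              then a + ((1 : Int) <<< m) else a) 0 from rfl]
    exact foldl_ite_sum (List.range nb)
      (fun m =>
        0 < PySem.List.pyGetD
          ((PySem.List.enumerate xs 0).foldl (deltaStep nb) (List.replicate nb 0)) (m : Int) 0)
      (fun m => (1 : Int) <<< m) 0
  rw [hA, hB]
  have hmap : ∀ m ∈ List.range nb,
      (if 0 < PySem.List.pyGetD
          ((PySem.List.enumerate xs 0).foldl (deltaStep nb) (List.replicate nb 0))
          (m : Int) 0
        then (1 : Int) <<< m else 0)
      = (if ((gNat xs.length m : Int)) < actualB xs m then (1 : Int) <<< m else 0) := by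
    intro m hm
    rw [List.mem_range] at hm
    rw [PySem.List.pyGetD_natCast, delta_getD xs nb m hm, gNat_eq_sumIdx]
    by_cases hlt : ((sumIdx xs.length m : Int)) < actualB xs m
    · rw [if_pos hlt, if_pos (by omega)]
    · rw [if_neg hlt, if_neg (by omega)]
  rw [tailSum, Nat.sub_zero, ← List.range_eq_range']
  congr 1
  congr 1
  exact (List.map_congr_left hmap).symm

-- ===== VERDICT (by name: the statement is the Claim_ definition above) =====
theorem doh1_spec : Claim_equal_doh1 := by
  intro xs _
  unfold Spec_doh1
  rcases xs with _ | ⟨y, ys⟩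
  · decide
  · exact main_ne (y :: ys) (by simp)
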